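-- pv_equiv track=rewrite | github.com/rransom8774/pkpsig-python-ref-impl-old-work | pkpsig/vectenc.py | encode_root
-- ===== SOURCE A (Python) =====
-- VECTOR_ENCODE_OUTMOD = 256
--
-- def ceildiv(m, div):
--     return (m + (div-1)) // div
--
-- def encode_root(root, root_bound):
--     """
--     encode_root(root, root_bound) -> S
--
--     For a given (R, M), the following should produce exactly the same result
--     as the vector encoding function in the NTRU Prime round 2 spec:
--
--        S, root, root_bound = encode(R, M)
--        S += encode_root(root, root_bound)
--     """
--     S, r, m = [], root, root_bound
--     while m > 1:
--         S.append(r % VECTOR_ENCODE_OUTMOD)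
--         r = (r // VECTOR_ENCODE_OUTMOD)
--         m = ceildiv(m, VECTOR_ENCODE_OUTMOD)
--         pass
--     return S
-- ===== SOURCE B (Python) =====
-- VECTOR_ENCODE_OUTMOD = 256
--
-- def encode_root(root, root_bound):
--     # Count digits from root_bound alone, then extract all digits in one shot.
--     num_digits = 0
--     m = root_bound
--     while m > 1:
--         num_digits += 1
--         m = (m + (VECTOR_ENCODE_OUTMOD - 1)) // VECTOR_ENCODE_OUTMOD
--     return [(root // VECTOR_ENCODE_OUTMOD ** i) % VECTOR_ENCODE_OUTMOD
--             for i in range(num_digits)]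
-- ===== Notes on version B (the rewrite author's own statement) =====
-- stated objective: alternative
-- what changed: Replaces the single fused while-loop (which threads S, r and m together) by two independent passes: an integer loop that computes the digit count from root_bound alone, then a comprehension extracting each digit of root directly as (root // 256**i) % 256.
import Mathlib
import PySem

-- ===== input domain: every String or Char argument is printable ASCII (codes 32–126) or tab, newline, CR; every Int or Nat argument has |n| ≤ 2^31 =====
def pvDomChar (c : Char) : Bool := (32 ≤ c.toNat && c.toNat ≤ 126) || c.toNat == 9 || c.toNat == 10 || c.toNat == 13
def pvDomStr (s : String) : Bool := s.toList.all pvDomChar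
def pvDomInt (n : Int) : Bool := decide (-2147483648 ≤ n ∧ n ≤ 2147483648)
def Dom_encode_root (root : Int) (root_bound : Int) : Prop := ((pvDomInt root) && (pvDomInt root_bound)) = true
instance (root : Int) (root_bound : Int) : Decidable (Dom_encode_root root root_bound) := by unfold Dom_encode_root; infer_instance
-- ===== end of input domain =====

-- B separates the digit-count loop (depends only on root_bound) from a one-shot digit
-- extraction by powers of 256 (depends only on root); objective: alternative decomposition.

-- ===== PORT A =====
def pyCeildiv (m div : Int) : Int := PySem.Int.floordiv (m + (div - 1)) div

theorem pyCeildiv_toNat_lt (m : Int) (h : 1 < m) : (pyCeildiv m 256).toNat < m.toNat := by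
  have h1 : pyCeildiv m 256 < m := by
    unfold pyCeildiv
    rw [PySem.Int.floordiv_lt_iff_lt_mul (by norm_num)]
    omega
  omega

def encodeRootLoop (S : List Int) (r m : Int) : List Int :=
  if 1 < m then
    encodeRootLoop (S ++ [PySem.Int.mod r 256]) (PySem.Int.floordiv r 256) (pyCeildiv m 256)
  else S
termination_by m.toNat
decreasing_by exact pyCeildiv_toNat_lt m (by assumption)

def encode_root (root : Int) (root_bound : Int) : List Int :=
  encodeRootLoop [] root root_bound

-- ===== PORT B =====
def numDigits (m : Int) : Nat :=
  if 1 < m then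
    numDigits (PySem.Int.floordiv (m + (256 - 1)) 256) + 1
  else 0
termination_by m.toNat
decreasing_by exact pyCeildiv_toNat_lt m (by assumption)

def encode_root_alt (root : Int) (root_bound : Int) : List Int :=
  (List.range (numDigits root_bound)).map
    (fun i => PySem.Int.mod (PySem.Int.floordiv root ((256 : Int) ^ i)) 256)

-- ===== PRECONDITION & SPEC =====
def Spec_encode_root (root : Int) (root_bound : Int) (out : List Int) : Prop := out = encode_root_alt root root_bound
instance (root : Int) (root_bound : Int) (out : List Int) : Decidable (Spec_encode_root root root_bound out) := by unfold Spec_encode_root; infer_instance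

-- ===== CLAIM (what is proved, stated in full; the proofs are below) =====
def Claim_equal_encode_root : Prop := ∀ (root : Int) (root_bound : Int), Dom_encode_root root root_bound → Spec_encode_root root root_bound (encode_root root root_bound)

-- ===== LEMMAS AND PROOFS =====
theorem floordiv_floordiv_pow (r : Int) (i : Nat) :
    PySem.Int.floordiv (PySem.Int.floordiv r 256) ((256 : Int) ^ i)
      = PySem.Int.floordiv r ((256 : Int) ^ (i + 1)) := by
  have hp : (0 : Int) < (256 : Int) ^ i := by positivity
  rw [PySem.Int.floordiv_eq_ediv_of_pos (b := (256:Int)) (by norm_num),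
      PySem.Int.floordiv_eq_ediv_of_pos hp,
      PySem.Int.floordiv_eq_ediv_of_pos (by positivity)]
  rw [Int.ediv_ediv_of_nonneg (by norm_num), pow_succ]
  ring_nf

theorem encodeRootLoop_eq (S : List Int) (r m : Int) :
    encodeRootLoop S r m
      = S ++ (List.range (numDigits m)).map
          (fun i => PySem.Int.mod (PySem.Int.floordiv r ((256 : Int) ^ i)) 256) := by
  induction S, r, m using encodeRootLoop.induct with
  | case1 S r m hm ih =>
    rw [encodeRootLoop, if_pos hm, ih]
    conv_rhs => rw [numDigits, if_pos hm]
    rw [List.range_succ_eq_map, List.map_cons, List.map_map]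
    simp only [pyCeildiv]
    rw [List.append_assoc, List.singleton_append]
    congr 1
    congr 1
    · simp [pow_zero, PySem.Int.floordiv, Int.fdiv_one]
    · apply List.map_congr_left
      intro i _
      simp only [Function.comp_apply, floordiv_floordiv_pow]
  | case2 S r m hm =>
    rw [encodeRootLoop, if_neg hm, numDigits, if_neg hm]
    simp

-- ===== VERDICT (by name: the statement is the Claim_ definition above) =====
theorem encode_root_spec : Claim_equal_encode_root := by
  intro root root_bound _
  unfold Spec_encode_root encode_root encode_root_alt
  rw [encodeRootLoop_eq]
  simp
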